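-- pv_equiv track=rewrite | github.com/chungwwei/cp-qs | round_f_2020/atm_queue.py | solve
-- ===== SOURCE A (Python) =====
-- def solve(A, n, x):
--     K = [0] * n
--     for i in range(n):
--         q = A[i] // x
--         q += 1 if A[i] % x > 0 else 0
--         K[i] = [i ,q]
--
--     K = sorted(K, key=lambda x: (x[1], x[0]))
--     res = []
--     for i, q in K:
--         res.append(str(i + 1))
--     return ' '.join(res)
-- ===== SOURCE B (Python) =====
-- def solve(A, n, x):
--     buckets = {}
--     for i in range(n):
--         a = A[i]
--         q = a // x
--         if a % x > 0:
--             q += 1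
--         buckets.setdefault(q, []).append(i + 1)
--     out = []
--     for q in sorted(buckets):
--         out.extend(str(j) for j in buckets[q])
--     return ' '.join(out)
-- ===== Notes on version B (the rewrite author's own statement) =====
-- stated objective: alternative
-- what changed: B groups 1-based indices into dict buckets keyed by their ceil-division round count (indices arrive in increasing order so buckets stay sorted) and then walks the sorted distinct keys, instead of building and sorting the full list of (index, rounds) pairs.
import Mathlib
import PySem

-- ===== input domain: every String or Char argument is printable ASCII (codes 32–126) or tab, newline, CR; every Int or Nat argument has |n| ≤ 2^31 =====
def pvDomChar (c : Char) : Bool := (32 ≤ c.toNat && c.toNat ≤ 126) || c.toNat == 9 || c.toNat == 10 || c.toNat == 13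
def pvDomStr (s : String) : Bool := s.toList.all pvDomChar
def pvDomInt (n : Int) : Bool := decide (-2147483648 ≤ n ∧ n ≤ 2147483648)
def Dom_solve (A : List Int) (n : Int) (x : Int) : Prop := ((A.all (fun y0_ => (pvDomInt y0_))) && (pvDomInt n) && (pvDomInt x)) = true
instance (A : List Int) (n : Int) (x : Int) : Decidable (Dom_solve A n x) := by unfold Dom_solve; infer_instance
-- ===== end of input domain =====

-- B groups 1-based indices into dict buckets keyed by their rounds count and walks the
-- sorted distinct keys, instead of sorting the full (index, rounds) pair list (objective: alternative).

-- ===== PORT A =====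
-- A's loop fills the pre-allocated K[i] for i = 0..n-1 in order, which builds the same
-- list as appending in loop order; ported as an appending fold.
def solve (A : List Int) (n : Int) (x : Int) : String :=
  let K : List (Int × Int) :=
    (PySem.List.pyRange 0 n 1).foldl (fun K i =>
      let q := PySem.Int.floordiv (PySem.List.pyGetD A i 0) x
      let q := q + (if PySem.Int.mod (PySem.List.pyGetD A i 0) x > 0 then 1 else 0)
      K ++ [(i, q)]) []
  let K := PySem.List.sorted2 K (fun p => p.2) (fun p => p.1)
  let res := K.foldl (fun res p => res ++ [PySem.Int.toStr (p.1 + 1)]) []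
  PySem.Str.join " " res

-- ===== PORT B =====
def solve_alt (A : List Int) (n : Int) (x : Int) : String :=
  let buckets : PySem.Dict Int (List Int) :=
    (PySem.List.pyRange 0 n 1).foldl (fun d i =>
      let a := PySem.List.pyGetD A i 0
      let q := PySem.Int.floordiv a x + (if PySem.Int.mod a x > 0 then 1 else 0)
      d.modify q [] (fun b => b ++ [i + 1])) PySem.Dict.empty
  let out := (PySem.List.sorted buckets.keys (fun k => k)).foldl
      (fun out q => out ++ (buckets.getD q []).map PySem.Int.toStr) []
  PySem.Str.join " " out

-- ===== PRECONDITION & SPEC =====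
-- Pre_ excludes exactly the inputs where the Python A raises: with a positive n,
-- x = 0 (ZeroDivisionError) or n > len(A) (IndexError); for n ≤ 0 the loop is empty and A returns.
def Pre_solve (A : List Int) (n : Int) (x : Int) : Prop := n ≤ 0 ∨ (x ≠ 0 ∧ n ≤ (A.length : Int))
instance (A : List Int) (n : Int) (x : Int) : Decidable (Pre_solve A n x) := by unfold Pre_solve; infer_instance
def pvWitness_solve : List Int × Int × Int := ([5, 1, 4, 4], 4, 2)
def Spec_solve (A : List Int) (n : Int) (x : Int) (out : String) : Prop := out = solve_alt A n x
instance (A : List Int) (n : Int) (x : Int) (out : String) : Decidable (Spec_solve A n x out) := by unfold Spec_solve; infer_instance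

-- ===== CLAIM (what is proved, stated in full; the proofs are below) =====
def Claim_equal_solve : Prop := ∀ (A : List Int) (n : Int) (x : Int), Dom_solve A n x → Pre_solve A n x → Spec_solve A n x (solve A n x)

-- ===== LEMMAS AND PROOFS =====

-- the rounds count of element i, shared by both programs
def pvQ (A : List Int) (x : Int) (i : Int) : Int :=
  PySem.Int.floordiv (PySem.List.pyGetD A i 0) x
    + (if PySem.Int.mod (PySem.List.pyGetD A i 0) x > 0 then 1 else 0)

theorem solve_unfold (A : List Int) (n x : Int) :
    solve A n x = PySem.Str.join " "
      ((PySem.List.sorted2 ((PySem.List.pyRange 0 n 1).map (fun i => (i, pvQ A x i)))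
          (fun p => p.2) (fun p => p.1)).map (fun p => PySem.Int.toStr (p.1 + 1))) := by
  unfold solve
  rw [show (fun (K : List (Int × Int)) (i : Int) =>
      let q := PySem.Int.floordiv (PySem.List.pyGetD A i 0) x
      let q := q + (if PySem.Int.mod (PySem.List.pyGetD A i 0) x > 0 then 1 else 0)
      K ++ [(i, q)]) = fun K i => K ++ [(i, pvQ A x i)] from rfl]
  simp only [PySem.List.foldl_append_singleton_eq_map, List.nil_append]

theorem solve_alt_unfold (A : List Int) (n x : Int) :
    solve_alt A n x = PySem.Str.join " "
      ((PySem.List.sorted (PySem.Set.ofList ((PySem.List.pyRange 0 n 1).map (pvQ A x)))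
          (fun k => k)).flatMap
        (fun q => (((PySem.List.pyRange 0 n 1).map (fun i => (pvQ A x i, i + 1))).filter
            (fun p => p.1 == q)).map (fun j => PySem.Int.toStr j.2))) := by
  have h0 : solve_alt A n x = PySem.Str.join " "
      (List.foldl (fun out q => out ++
          (((PySem.List.pyRange 0 n 1).foldl
              (fun d i => d.modify (pvQ A x i) [] (fun b => b ++ [i + 1]))
              PySem.Dict.empty).getD q []).map PySem.Int.toStr) []
        (PySem.List.sorted ((PySem.List.pyRange 0 n 1).foldl
            (fun d i => d.modify (pvQ A x i) [] (fun b => b ++ [i + 1]))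
            PySem.Dict.empty).keys (fun k => k))) := rfl
  rw [h0]
  have hm : (PySem.List.pyRange 0 n 1).foldl
        (fun d i => d.modify (pvQ A x i) [] (fun b => b ++ [i + 1])) PySem.Dict.empty
      = List.foldl (fun d p => d.modify p.1 [] (fun b => b ++ [p.2])) PySem.Dict.empty
          ((PySem.List.pyRange 0 n 1).map (fun i => (pvQ A x i, i + 1))) := by
    rw [List.foldl_map]
  rw [hm]
  have hkeys : (List.foldl (fun (d : PySem.Dict Int (List Int)) p =>
        d.modify p.1 [] (fun b => b ++ [p.2])) PySem.Dict.empty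
        ((PySem.List.pyRange 0 n 1).map (fun i => (pvQ A x i, i + 1)))).keys
      = PySem.Set.ofList ((PySem.List.pyRange 0 n 1).map (pvQ A x)) := by
    have h := PySem.Dict.keys_foldl_modify_key
        ((PySem.List.pyRange 0 n 1).map (fun i => (pvQ A x i, i + 1)))
        (fun p : Int × Int => p.1) ([] : List Int)
        (fun _ p => fun b => b ++ [p.2]) PySem.Dict.empty
    have h2 : PySem.Set.update (PySem.Dict.empty : PySem.Dict Int (List Int)).keys
        (((PySem.List.pyRange 0 n 1).map (fun i => (pvQ A x i, i + 1))).map (fun p => p.1))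
        = PySem.Set.ofList ((PySem.List.pyRange 0 n 1).map (pvQ A x)) := by
      rw [PySem.Dict.keys_empty, List.map_map]
      rfl
    exact h.trans h2
  rw [hkeys]
  simp only [PySem.Dict.getD_foldl_modify_append, PySem.Dict.getD_empty, List.nil_append]
  rw [PySem.List.foldl_append_eq_flatMap, List.nil_append]
  simp only [List.map_map]
  rfl

-- sorted2 with Int keys is sorted under the lexicographic product key
theorem sorted2_eq_sorted_lex (xs : List (Int × Int)) (k1 k2 : Int × Int → Int) :
    PySem.List.sorted2 xs k1 k2 = PySem.List.sorted xs (fun p => toLex (k1 p, k2 p)) := by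
  rw [PySem.List.sorted_eq_foldl_insertBy]
  show xs.foldl (fun acc p => PySem.List.insertBy
      (fun a b => decide (k1 a < k1 b) || (!decide (k1 b < k1 a) && decide (k2 a < k2 b))) p acc) []
    = xs.foldl (fun acc p => PySem.List.insertBy
      (fun a b => decide ((toLex (k1 a, k2 a) : Lex (Int × Int)) < toLex (k1 b, k2 b))) p acc) []
  have hcmp : (fun (a b : Int × Int) =>
      decide (k1 a < k1 b) || (!decide (k1 b < k1 a) && decide (k2 a < k2 b)))
    = fun a b => decide ((toLex (k1 a, k2 a) : Lex (Int × Int)) < toLex (k1 b, k2 b)) := by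
    funext a b
    by_cases h1 : k1 a < k1 b
    · simp [Prod.Lex.toLex_lt_toLex, h1]
    · by_cases h2 : k1 b < k1 a
      · simp [Prod.Lex.toLex_lt_toLex, h1, h2, h2.ne']
      · have he : k1 a = k1 b := le_antisymm (not_lt.mp h2) (not_lt.mp h1)
        simp [Prod.Lex.toLex_lt_toLex, he]
  rw [hcmp]

theorem sum_if_zero (Q : List Int) (v : Int) (c : Nat) (hv : v ∉ Q) :
    (Q.map (fun q => if v = q then c else 0)).sum = 0 := by
  induction Q with
  | nil => simp
  | cons q Q ih =>
    simp only [List.mem_cons, not_or] at hv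
    simp [hv.1, ih hv.2]

theorem sum_if_count (Q : List Int) (hnd : Q.Nodup) (v : Int) (c : Nat) (hv : v ∈ Q) :
    (Q.map (fun q => if v = q then c else 0)).sum = c := by
  induction Q with
  | nil => simp at hv
  | cons q Q ih =>
    rcases List.nodup_cons.mp hnd with ⟨hq, hnd'⟩
    rcases List.mem_cons.mp hv with h | h
    · subst h
      simp [sum_if_zero Q v c hq]
    · have hvq : v ≠ q := by rintro rfl; exact hq h
      simp [hvq, ih hnd' h]

-- a Nodup key list covering L: flatMap of the fiber filters is a permutation of L
theorem perm_flatMap_filter (Q : List Int) (hnd : Q.Nodup) (L : List (Int × Int))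
    (h : ∀ p ∈ L, p.2 ∈ Q) :
    (Q.flatMap (fun q => L.filter (fun p => p.2 == q))).Perm L := by
  rw [List.perm_iff_count]
  intro a
  rw [List.count_flatMap]
  have hfc : ∀ q : Int, List.count a (L.filter (fun p => p.2 == q))
      = if a.2 = q then List.count a L else 0 := by
    intro q
    by_cases hq : a.2 = q
    · rw [if_pos hq, List.count_filter (by simp [hq])]
    · rw [if_neg hq, List.count_eq_zero]
      intro hmem
      exact hq (by simpa using (List.mem_filter.mp hmem).2)
  have hmap : Q.map (List.count a ∘ fun q => L.filter (fun p => p.2 == q))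
      = Q.map (fun q => if a.2 = q then List.count a L else 0) :=
    List.map_congr_left (fun q _ => hfc q)
  rw [hmap]
  by_cases ha : a.2 ∈ Q
  · rw [sum_if_count Q hnd a.2 _ ha]
  · rw [sum_if_zero Q a.2 _ ha]
    symm
    rw [List.count_eq_zero]
    intro hmem
    exact ha (h a hmem)

theorem sorted_spec_core (A : List Int) (n x : Int) :
    PySem.List.sorted2 ((PySem.List.pyRange 0 n 1).map (fun i => (i, pvQ A x i)))
        (fun p => p.2) (fun p => p.1)
      = (PySem.List.sorted (PySem.Set.ofList ((PySem.List.pyRange 0 n 1).map (pvQ A x)))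
            (fun k => k)).flatMap
          (fun q => ((PySem.List.pyRange 0 n 1).map (fun i => (i, pvQ A x i))).filter
            (fun p => p.2 == q)) := by
  set R := PySem.List.pyRange 0 n 1 with hR
  set L : List (Int × Int) := R.map (fun i => (i, pvQ A x i)) with hL
  set Q : List Int := PySem.List.sorted (PySem.Set.ofList (R.map (pvQ A x))) (fun k => k) with hQ
  have hQperm : Q.Perm (PySem.Set.ofList (R.map (pvQ A x))) := PySem.List.sorted_perm _ _ _
  have hQnd : Q.Nodup := hQperm.nodup_iff.mpr (PySem.Set.nodup_ofList _)
  have hQlt : Q.Pairwise (· < ·) := PySem.List.sorted_ofList_pairwise_lt _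
  have hcov : ∀ p ∈ L, p.2 ∈ Q := by
    intro p hp
    rcases List.mem_map.mp hp with ⟨i, hi, rfl⟩
    exact (PySem.List.mem_sorted _ _ _ _).mpr
      ((PySem.Set.mem_ofList _ _).mpr (List.mem_map.mpr ⟨i, hi, rfl⟩))
  rw [sorted2_eq_sorted_lex]
  apply PySem.List.sorted_eq_of_perm_of_pairwise_lt
  · exact perm_flatMap_filter Q hQnd L hcov
  · -- pairwise lex-increasing of the flatMap
    rw [List.flatMap_def, List.pairwise_flatten]
    constructor
    · intro l hl
      rcases List.mem_map.mp hl with ⟨q, _, rfl⟩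
      have hL1 : L.Pairwise (fun p r : Int × Int => p.1 < r.1) := by
        rw [hL, List.pairwise_map]
        exact PySem.List.pairwise_lt_pyRange_one 0 n
      have hfilt : (L.filter (fun p => p.2 == q)).Pairwise (fun p r : Int × Int => p.1 < r.1) :=
        hL1.sublist List.filter_sublist
      refine hfilt.imp_of_mem ?_
      intro p r hp hr h1
      have hp2 : p.2 = q := by simpa using (List.mem_filter.mp hp).2
      have hr2 : r.2 = q := by simpa using (List.mem_filter.mp hr).2
      rw [Prod.Lex.toLex_lt_toLex]
      exact Or.inr ⟨by rw [hp2, hr2], h1⟩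
    · rw [List.pairwise_map]
      refine hQlt.imp_of_mem ?_
      intro q1 q2 _ _ hlt p hp r hr
      have hp2 : p.2 = q1 := by simpa using (List.mem_filter.mp hp).2
      have hr2 : r.2 = q2 := by simpa using (List.mem_filter.mp hr).2
      rw [Prod.Lex.toLex_lt_toLex]
      exact Or.inl (by rw [hp2, hr2]; exact hlt)

-- ===== VERDICT (by name: the statement is the Claim_ definition above) =====
theorem solve_spec : Claim_equal_solve := by
  intro A n x _ _
  unfold Spec_solve
  rw [solve_unfold, solve_alt_unfold]
  congr 1
  rw [sorted_spec_core, List.map_flatMap]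
  congr 1
  funext q
  have h1 : (PySem.List.pyRange 0 n 1).map (fun i => (pvQ A x i, i + 1))
      = ((PySem.List.pyRange 0 n 1).map (fun i => (i, pvQ A x i))).map
          (fun p => (p.2, p.1 + 1)) := by
    rw [List.map_map]
    rfl
  conv_rhs => rw [h1, List.filter_map, List.map_map]
  rfl
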